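-- pv_equiv track=rewrite | github.com/esaul314/chunkify | pdf_chunker/passes/emit_jsonl_lists.py | partition_preamble
-- ===== SOURCE A (Python) =====
-- def partition_preamble(lines: list[str]) -> tuple[list[str], list[str]]:
--     """Partition lines into main content and trailing preamble."""
--     if not lines:
--         return [], []
--
--     idx = len(lines)
--     while idx > 0 and lines[idx - 1].strip():
--         idx -= 1
--     while idx > 0 and not lines[idx - 1].strip():
--         idx -= 1
--
--     if idx == 0:
--         return lines, []
--     return lines[:idx], lines[idx:]
-- ===== SOURCE B (Python) =====
-- def partition_preamble(lines: list[str]) -> tuple[list[str], list[str]]: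
--     """Partition lines into main content and trailing preamble."""
--     # One forward pass building alternating runs of blank/non-blank lines,
--     # then read the preamble length off the tail of the run list.
--     runs: list[tuple[bool, int]] = []
--     for line in lines:
--         k = bool(line.strip())
--         if runs and runs[-1][0] == k:
--             runs[-1] = (k, runs[-1][1] + 1)
--         else:
--             runs.append((k, 1))
--
--     if not runs:
--         return [], []
--
--     last_k, last_n = runs[-1]
--     if last_k:
--         pre = last_n + (runs[-2][1] if len(runs) > 1 else 0)
--     else:
--         pre = last_n
--
--     idx = len(lines) - pre
--     if idx == 0:
--         return lines, []
--     return lines[:idx], lines[idx:]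
-- ===== Notes on version B (the rewrite author's own statement) =====
-- stated objective: alternative
-- what changed: Replaces A's two backward while-loops with a single forward pass that groups lines into alternating blank/non-blank runs and derives the preamble length from the last one or two runs.
import Mathlib
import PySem

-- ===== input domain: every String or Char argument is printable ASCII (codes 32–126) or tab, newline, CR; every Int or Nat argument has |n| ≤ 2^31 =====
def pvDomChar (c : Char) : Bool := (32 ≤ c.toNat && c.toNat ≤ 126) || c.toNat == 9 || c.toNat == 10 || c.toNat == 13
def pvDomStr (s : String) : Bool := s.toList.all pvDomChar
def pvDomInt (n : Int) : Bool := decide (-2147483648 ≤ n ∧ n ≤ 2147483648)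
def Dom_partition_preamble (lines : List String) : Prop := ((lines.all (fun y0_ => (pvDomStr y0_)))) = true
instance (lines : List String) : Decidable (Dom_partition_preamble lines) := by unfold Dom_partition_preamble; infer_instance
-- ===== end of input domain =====

-- B replaces A's two backward while-loops by one forward pass grouping lines into
-- alternating blank/non-blank runs and reading the preamble length off the last runs
-- (objective: alternative decomposition; same O(n) cost, same return value).

-- truthiness of line.strip() (a Python str is truthy iff non-empty), used by both sources
def pvTruthy (s : String) : Bool := PySem.Str.strip s != ""

-- ===== PORT A =====
-- `while idx > 0 and lines[idx-1].strip(): idx -= 1` (idx stays ≤ len, so getD is exact)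
def pvLoop1 (lines : List String) : Nat → Nat
  | 0 => 0
  | j + 1 => if pvTruthy (lines.getD j "") then pvLoop1 lines j else j + 1

-- `while idx > 0 and not lines[idx-1].strip(): idx -= 1`
def pvLoop2 (lines : List String) : Nat → Nat
  | 0 => 0
  | j + 1 => if !pvTruthy (lines.getD j "") then pvLoop2 lines j else j + 1

def partition_preamble (lines : List String) : List String × List String :=
  if lines = [] then ([], [])
  else
    let idx := pvLoop2 lines (pvLoop1 lines lines.length)
    -- lines[:idx], lines[idx:] with 0 ≤ idx ≤ len are exactly take/drop
    if idx = 0 then (lines, []) else (lines.take idx, lines.drop idx)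

-- ===== PORT B =====
-- Source B keeps the run list with the LAST run at the end (runs[-1]); the port keeps it
-- reversed (last run first), so "update runs[-1] / append" becomes this head step.
def pvStep (runsRev : List (Bool × Nat)) (k : Bool) : List (Bool × Nat) :=
  match runsRev with
  | (k', n) :: rest => if k' = k then (k', n + 1) :: rest else (k, 1) :: (k', n) :: rest
  | [] => [(k, 1)]

def partition_preamble_alt (lines : List String) : List String × List String :=
  let runsRev := lines.foldl (fun acc line => pvStep acc (pvTruthy line)) []
  match runsRev with
  | [] => ([], [])
  | (lastK, lastN) :: rest =>
    let pre := if lastK then lastN + (match rest with | (_, m) :: _ => m | [] => 0) else lastN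
    let idx := lines.length - pre
    if idx = 0 then (lines, []) else (lines.take idx, lines.drop idx)

-- ===== PRECONDITION & SPEC =====
def Spec_partition_preamble (lines : List String) (out : List String × List String) : Prop := out = partition_preamble_alt lines
instance (lines : List String) (out : List String × List String) : Decidable (Spec_partition_preamble lines out) := by unfold Spec_partition_preamble; infer_instance

-- ===== CLAIM (what is proved, stated in full; the proofs are below) =====
def Claim_equal_partition_preamble : Prop := ∀ (lines : List String), Dom_partition_preamble lines → Spec_partition_preamble lines (partition_preamble lines)

-- ===== LEMMAS AND PROOFS =====

-- reference run decomposition of a Boolean list (head run first)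
def pvRuns : List Bool → List (Bool × Nat)
  | [] => []
  | b :: bs => (b, (bs.takeWhile (fun x => x = b)).length + 1) :: pvRuns (bs.dropWhile (fun x => x = b))
termination_by l => l.length
decreasing_by simpa using Nat.lt_succ_of_le (List.length_dropWhile_le _ _)

-- preamble length read off a reversed run list, as Source B reads it
def pvPre : List (Bool × Nat) → Nat
  | [] => 0
  | (k, n) :: rest => if k then n + (match rest with | (_, m) :: _ => m | [] => 0) else n

theorem pvStep_runs (bs : List Bool) (b : Bool) : pvStep (pvRuns bs) b = pvRuns (b :: bs) := by
  cases bs with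
  | nil => simp [pvRuns, pvStep]
  | cons c cs =>
    by_cases h : c = b
    · subst h
      simp [pvRuns, pvStep]
    · simp [pvRuns, pvStep, h]

theorem pvFoldl_step (bs : List Bool) : bs.foldl pvStep [] = pvRuns bs.reverse := by
  induction bs using List.reverseRecOn with
  | nil => simp [pvRuns]
  | append_singleton l x ih => rw [List.foldl_concat, ih, pvStep_runs]; simp

theorem pvRuns_nil_iff (bs : List Bool) : pvRuns bs = [] ↔ bs = [] := by
  cases bs <;> simp [pvRuns]

theorem pvDropWhile_head {p : Bool → Bool} {l : List Bool} {c : Bool} {cs : List Bool}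
    (h : l.dropWhile p = c :: cs) : p c = false := by
  induction l with
  | nil => simp at h
  | cons a l ih =>
    by_cases ha : p a
    · simp [ha] at h; exact ih h
    · simp [ha] at h; simp [← h.1]; simpa using ha

theorem pvDrop_takeWhile (l : List Bool) (p : Bool → Bool) :
    l.drop (l.takeWhile p).length = l.dropWhile p := by
  induction l with
  | nil => simp
  | cons a l ih => by_cases h : p a <;> simp [h, ih]

theorem pvLen_takeWhile_le (l : List Bool) (p : Bool → Bool) :
    (l.takeWhile p).length ≤ l.length := by
  induction l with
  | nil => simp
  | cons a l ih =>
    by_cases h : p a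
    · simp [h]; omega
    · simp [h]

theorem pvPre_runs (bs : List Bool) :
    pvPre (pvRuns bs) =
      (bs.takeWhile (fun x => x)).length +
      ((bs.dropWhile (fun x => x)).takeWhile (fun x => !x)).length := by
  cases bs with
  | nil => simp [pvRuns, pvPre]
  | cons b bs =>
    cases b with
    | false =>
      rw [pvRuns]
      simp only [pvPre]
      simp
    | true =>
      rw [pvRuns]
      simp only [pvPre]
      cases hd : bs.dropWhile (fun x => x = true) with
      | nil =>
        have : bs.dropWhile (fun x => x) = [] := by simpa using hd
        simp [pvRuns, this]
      | cons c cs =>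
        have hc : c = false := by simpa using pvDropWhile_head hd
        subst hc
        have : bs.dropWhile (fun x => x) = false :: cs := by simpa using hd
        rw [pvRuns]
        simp [this]

theorem pvLoop1_spec (lines : List String) (j : Nat) (h : j ≤ lines.length) :
    pvLoop1 lines j = j - (((lines.take j).map pvTruthy).reverse.takeWhile (fun x => x)).length := by
  induction j with
  | zero => simp [pvLoop1]
  | succ j ih =>
    have hj : j < lines.length := h
    have hrev : ((lines.take (j + 1)).map pvTruthy).reverse
        = pvTruthy lines[j] :: ((lines.take j).map pvTruthy).reverse := by
      rw [List.take_succ_eq_append_getElem hj, List.map_append, List.reverse_append]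
      simp
    rw [pvLoop1, List.getD_eq_getElem lines "" hj, hrev]
    by_cases hb : pvTruthy lines[j]
    · rw [if_pos hb, ih (Nat.le_of_lt hj)]
      simp [hb]
    · rw [if_neg hb]
      simp [hb]

theorem pvLoop2_spec (lines : List String) (j : Nat) (h : j ≤ lines.length) :
    pvLoop2 lines j = j - (((lines.take j).map pvTruthy).reverse.takeWhile (fun x => !x)).length := by
  induction j with
  | zero => simp [pvLoop2]
  | succ j ih =>
    have hj : j < lines.length := h
    have hrev : ((lines.take (j + 1)).map pvTruthy).reverse
        = pvTruthy lines[j] :: ((lines.take j).map pvTruthy).reverse := by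
      rw [List.take_succ_eq_append_getElem hj, List.map_append, List.reverse_append]
      simp
    rw [pvLoop2, List.getD_eq_getElem lines "" hj, hrev]
    by_cases hb : pvTruthy lines[j]
    · simp [hb]
    · rw [if_pos (by simp [hb]), ih (Nat.le_of_lt hj)]
      simp [hb]

-- A's idx equals len − pre(runs of the reversed truthiness list)
theorem pvIdx_eq (lines : List String) :
    pvLoop2 lines (pvLoop1 lines lines.length)
      = lines.length - pvPre (pvRuns ((lines.map pvTruthy).reverse)) := by
  set r : List Bool := (lines.map pvTruthy).reverse with hr
  have hlenr : r.length = lines.length := by simp [hr]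
  set T : Nat := (r.takeWhile (fun x => x)).length with hT
  have hTle : T ≤ lines.length := by
    rw [hT, ← hlenr]; exact pvLen_takeWhile_le _ _
  have h1 : pvLoop1 lines lines.length = lines.length - T := by
    rw [pvLoop1_spec lines lines.length le_rfl]
    simp [hr, hT]
  have htake : ((lines.take (lines.length - T)).map pvTruthy).reverse = r.drop T := by
    rw [List.map_take, List.reverse_take, ← hr]
    congr 1
    simp
    omega
  have h2 := pvLoop2_spec lines (lines.length - T) (Nat.sub_le _ _)
  rw [h1, h2, htake, pvDrop_takeWhile, pvPre_runs]
  have hF : ((r.dropWhile (fun x => x)).takeWhile (fun x => !x)).length ≤ lines.length - T := by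
    calc ((r.dropWhile (fun x => x)).takeWhile (fun x => !x)).length
        ≤ (r.dropWhile (fun x => x)).length := pvLen_takeWhile_le _ _
      _ = (r.drop T).length := by rw [pvDrop_takeWhile]
      _ = lines.length - T := by simp [hlenr]
  omega

-- ===== VERDICT (by name: the statement is the Claim_ definition above) =====
theorem partition_preamble_spec : Claim_equal_partition_preamble := by
  intro lines _
  unfold Spec_partition_preamble partition_preamble partition_preamble_alt
  have hfold : lines.foldl (fun acc line => pvStep acc (pvTruthy line)) []
      = pvRuns ((lines.map pvTruthy).reverse) := by
    rw [← List.foldl_map, pvFoldl_step]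
  rw [hfold]
  by_cases hnil : lines = []
  · subst hnil; simp [pvRuns]
  · rw [if_neg hnil]
    cases hruns : pvRuns ((lines.map pvTruthy).reverse) with
    | nil =>
      exfalso
      rw [pvRuns_nil_iff] at hruns
      simp [hnil] at hruns
    | cons hd tl =>
      obtain ⟨k, n⟩ := hd
      have hidx := pvIdx_eq lines
      rw [hruns] at hidx
      simp only [pvPre] at hidx
      simp only [hidx]
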